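-- pv_equiv track=rewrite | github.com/jcolinpatrick/kryptos | jobs/done/ant_003_merged_transposition.py | route_column_zigzag
-- ===== SOURCE A (Python) =====
-- def route_column_zigzag(ct: str, nrows: int, ncols: int) -> str:
--     """Read column-wise with alternating column direction."""
--     n = len(ct)
--     if nrows * ncols < n:
--         return ""
--
--     grid = [['' for _ in range(ncols)] for _ in range(nrows)]
--     pos = 0
--     for r in range(nrows):
--         for c in range(ncols):
--             if pos < n:
--                 grid[r][c] = ct[pos]
--                 pos += 1
--
--     result = []
--     for c in range(ncols):
--         rows = range(nrows) if c % 2 == 0 else range(nrows - 1, -1, -1)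
--         for r in rows:
--             if grid[r][c]:
--                 result.append(grid[r][c])
--
--     return "".join(result)
-- ===== SOURCE B (Python) =====
-- def route_column_zigzag(ct: str, nrows: int, ncols: int) -> str:
--     """Read column-wise with alternating column direction (no grid: stride slices)."""
--     n = len(ct)
--     if nrows * ncols < n:
--         return ""
--     parts = []
--     for c in range(ncols):
--         col = ct[c::ncols]
--         if c % 2 == 1:
--             col = col[::-1]
--         parts.append(col)
--     return "".join(parts)
-- ===== Notes on version B (the rewrite author's own statement) =====
-- stated objective: simpler
-- what changed: Replaces the 2D grid fill plus zigzag cell-by-cell read (with truthiness checks) by one pass over columns using stride slices ct[c::ncols], reversing odd columns, with no grid at all.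
import Mathlib
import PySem

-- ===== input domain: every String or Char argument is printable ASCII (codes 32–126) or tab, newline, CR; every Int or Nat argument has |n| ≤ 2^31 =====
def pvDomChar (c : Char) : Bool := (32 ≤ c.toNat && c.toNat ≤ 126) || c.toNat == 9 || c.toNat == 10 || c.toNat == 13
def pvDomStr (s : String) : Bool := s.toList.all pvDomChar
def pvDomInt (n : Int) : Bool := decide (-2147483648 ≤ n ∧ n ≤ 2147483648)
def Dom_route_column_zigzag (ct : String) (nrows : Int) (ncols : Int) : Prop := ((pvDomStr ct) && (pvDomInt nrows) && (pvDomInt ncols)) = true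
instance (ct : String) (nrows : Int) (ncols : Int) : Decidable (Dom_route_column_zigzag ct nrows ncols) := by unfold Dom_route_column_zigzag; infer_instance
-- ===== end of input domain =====

-- B drops A's 2D grid: one pass over columns with stride slices ct[c::ncols], odd columns reversed (objective: simpler).

-- ===== PORT A =====
def route_column_zigzag (ct : String) (nrows : Int) (ncols : Int) : String :=
  let cs := ct.toList
  let n : Int := PySem.Chars.len cs
  if nrows * ncols < n then "" else
  -- grid = [['' for _ in range(ncols)] for _ in range(nrows)]; a cell is a string: '' = [], one char = [ch]
  let grid0 : List (List (List Char)) :=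
    (PySem.List.pyRange 0 nrows 1).map (fun _ => (PySem.List.pyRange 0 ncols 1).map (fun _ => []))
  -- fill loop, state (grid, pos); pos < n guards the ct[pos] access, so pyGetD is exact
  let st : List (List (List Char)) × Int :=
    (PySem.List.pyRange 0 nrows 1).foldl (fun st r =>
      (PySem.List.pyRange 0 ncols 1).foldl (fun st c =>
        if st.2 < n then
          (PySem.List.pySetD st.1 r
             (PySem.List.pySetD (PySem.List.pyGetD st.1 r []) c [PySem.List.pyGetD cs st.2 ' ']),
           st.2 + 1)
        else st) st) (grid0, 0)
  let grid := st.1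
  -- read loop: zigzag over columns, truthiness check on each cell
  let result : List (List Char) :=
    (PySem.List.pyRange 0 ncols 1).foldl (fun res c =>
      let rows := if PySem.Int.mod c 2 = 0 then PySem.List.pyRange 0 nrows 1
                  else PySem.List.pyRange (nrows - 1) (-1) (-1)
      rows.foldl (fun res r =>
        let cell := PySem.List.pyGetD (PySem.List.pyGetD grid r []) c []
        if cell ≠ [] then res ++ [cell] else res) res) []
  String.ofList result.flatten   -- "".join(result)

-- ===== PORT B =====
def route_column_zigzag_alt (ct : String) (nrows : Int) (ncols : Int) : String :=
  let cs := ct.toList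
  let n : Int := PySem.Chars.len cs
  if nrows * ncols < n then "" else
  let parts : List (List Char) :=
    (PySem.List.pyRange 0 ncols 1).foldl (fun parts c =>
      -- ct[c::ncols]; inside the loop ncols ≥ 1, so the step is never 0 and slice? is some
      let col := (PySem.List.slice? cs (some c) none ncols).getD []
      -- col[::-1] is reverse (PySem.List.slice?_none_none_neg_one)
      let col := if PySem.Int.mod c 2 = 1 then col.reverse else col
      parts ++ [col]) []
  String.ofList parts.flatten   -- "".join(parts)

-- ===== PRECONDITION & SPEC =====
def Spec_route_column_zigzag (ct : String) (nrows : Int) (ncols : Int) (out : String) : Prop := out = route_column_zigzag_alt ct nrows ncols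
instance (ct : String) (nrows : Int) (ncols : Int) (out : String) : Decidable (Spec_route_column_zigzag ct nrows ncols out) := by unfold Spec_route_column_zigzag; infer_instance

-- ===== CLAIM (what is proved, stated in full; the proofs are below) =====
def Claim_equal_route_column_zigzag : Prop := ∀ (ct : String) (nrows : Int) (ncols : Int), Dom_route_column_zigzag ct nrows ncols → Spec_route_column_zigzag ct nrows ncols (route_column_zigzag ct nrows ncols)

-- ===== LEMMAS AND PROOFS =====

-- the filled cell (r,c) after the first m characters of cs have been placed row-major
def cellAt (cs : List Char) (C r c m : Nat) : List Char :=
  if r * C + c < m then [cs.getD (r * C + c) ' '] else []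

-- the grid after m characters have been placed
def gridAt (cs : List Char) (R C m : Nat) : List (List (List Char)) :=
  (List.range R).map (fun r => (List.range C).map (fun c => cellAt cs C r c m))

-- number of filled cells in column c (C > 0)
def colCnt (n c C : Nat) : Nat := (n - c + C - 1) / C

-- column c read top-to-bottom
def colClosed (cs : List Char) (C c : Nat) : List Char :=
  (List.range (colCnt cs.length c C)).map (fun k => cs.getD (k * C + c) ' ')

-- column c in reading direction (odd columns bottom-up)
def colZig (cs : List Char) (C c : Nat) : List Char :=
  if c % 2 = 0 then colClosed cs C c else (colClosed cs C c).reverse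

lemma pyRange_toNat (m : Int) :
    PySem.List.pyRange 0 m 1 = (List.range m.toNat).map (fun k : Nat => (k : Int)) := by
  rcases (by omega : 0 ≤ m ∨ m < 0) with h | h
  · obtain ⟨k, rfl⟩ := Int.eq_ofNat_of_zero_le h
    rw [Int.toNat_natCast]
    exact PySem.List.pyRange_zero_nat k
  · rw [PySem.List.pyRange_one_eq_nil (by omega)]
    have : m.toNat = 0 := by omega
    simp [this]

lemma lt_colCnt_iff {C : Nat} (hC : 0 < C) (n c r : Nat) :
    r < colCnt n c C ↔ r * C + c < n := by
  rw [colCnt, Nat.lt_iff_add_one_le, Nat.le_div_iff_mul_le hC, Nat.add_one_mul]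
  generalize r * C = x
  omega

lemma cell_index_inj {C c c' : Nat} (hc : c < C) (hc' : c' < C) {j r : Nat}
    (h : j * C + c' = r * C + c) : j = r ∧ c' = c := by
  have h1 : (j * C + c') / C = j := by
    rw [Nat.mul_comm j C, Nat.mul_add_div (by omega : 0 < C), Nat.div_eq_of_lt hc', Nat.add_zero]
  have h2 : (r * C + c) / C = r := by
    rw [Nat.mul_comm r C, Nat.mul_add_div (by omega : 0 < C), Nat.div_eq_of_lt hc, Nat.add_zero]
  have hjr : j = r := by rw [← h1, h, h2]
  subst hjr
  omega

lemma pyGetD_map_range {α : Type} (f : Nat → α) (R k : Nat) (hk : k < R) (d : α) :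
    PySem.List.pyGetD ((List.range R).map f) (k : Int) d = f k := by
  rw [PySem.List.pyGetD_natCast]
  exact PySem.List.getD_map_range f R k d hk

lemma pySetD_map_range {α : Type} (f : Nat → α) (C k : Nat) (hk : k < C) (v : α) :
    PySem.List.pySetD ((List.range C).map f) (k : Int) v
      = (List.range C).map (fun j => if j = k then v else f j) := by
  have hlen : ((List.range C).map f).length = C := by simp
  have hidx : PySem.List.pyIdx? ((List.range C).map f).length (k : Int) = some k := by
    simp [PySem.List.pyIdx?, hlen, hk]
  rw [PySem.List.pySetD, PySem.List.pySet?, hidx]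
  simp only [Option.map_some, Option.getD_some]
  apply List.ext_getElem
  · simp
  · intro i h1 h2
    simp only [List.getElem_set, List.getElem_map, List.getElem_range]
    rcases eq_or_ne i k with hik | hik
    · simp [hik]
    · simp [hik, (Ne.symm hik : k ≠ i)]

lemma fill_step (cs : List Char) (R C r c : Nat) (hr : r < R) (hc : c < C)
    (hv : r * C + c < cs.length) :
    PySem.List.pySetD (gridAt cs R C (r * C + c)) (r : Int)
      (PySem.List.pySetD (PySem.List.pyGetD (gridAt cs R C (r * C + c)) (r : Int) []) (c : Int)
        [PySem.List.pyGetD cs ((r * C + c : Nat) : Int) ' '])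
      = gridAt cs R C (r * C + c + 1) := by
  unfold gridAt
  rw [pyGetD_map_range _ R r hr, pySetD_map_range _ C c hc, pySetD_map_range _ R r hr,
      PySem.List.pyGetD_natCast]
  apply List.map_congr_left
  intro i hi
  rcases eq_or_ne i r with rfl | hir
  · rw [if_pos rfl]
    apply List.map_congr_left
    intro j hj
    have hj' := List.mem_range.mp hj
    rcases eq_or_ne j c with rfl | hjc
    · simp [cellAt, hv]
    · rw [if_neg hjc]
      unfold cellAt
      rw [if_congr (by omega : (i * C + j < i * C + c) ↔ (i * C + j < i * C + c + 1)) rfl rfl]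
  · rw [if_neg hir]
    apply List.map_congr_left
    intro j hj
    have hj' := List.mem_range.mp hj
    have hne : i * C + j ≠ r * C + c := fun h => hir ((cell_index_inj hc hj' h).1)
    unfold cellAt
    rw [if_congr (by omega : (i * C + j < r * C + c) ↔ (i * C + j < r * C + c + 1)) rfl rfl]

lemma fill_inner (cs : List Char) (R C r : Nat) (hr : r < R) :
    ∀ k, k ≤ C →
    (List.range k).foldl (fun st (c : Nat) =>
        if st.2 < PySem.Chars.len cs then
          (PySem.List.pySetD st.1 (r : Int)
             (PySem.List.pySetD (PySem.List.pyGetD st.1 (r : Int) []) (c : Int)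
               [PySem.List.pyGetD cs st.2 ' ']),
           st.2 + 1)
        else st)
      (gridAt cs R C (min (r * C) cs.length), ((min (r * C) cs.length : Nat) : Int))
    = (gridAt cs R C (min (r * C + k) cs.length), ((min (r * C + k) cs.length : Nat) : Int)) := by
  intro k
  induction k with
  | zero => intro _; simp
  | succ k ih =>
    intro hk
    rw [List.range_succ, List.foldl_append, ih (by omega)]
    set n := cs.length with hn
    rcases (by omega : r * C + k < n ∨ n ≤ r * C + k) with h | h
    · have hmin : min (r * C + k) n = r * C + k := by omega
      have hmin2 : min (r * C + (k + 1)) n = r * C + k + 1 := by omega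
      have hcond : ((min (r * C + k) n : Nat) : Int) < PySem.Chars.len cs := by
        rw [PySem.Chars.len_eq, hmin]; exact_mod_cast h
      simp only [List.foldl_cons, List.foldl_nil]
      rw [if_pos hcond, hmin, hmin2, fill_step cs R C r k hr (by omega) (by omega)]
      refine Prod.ext rfl ?_
      push_cast
      ring
    · have hmin : min (r * C + k) n = n := by omega
      have hmin2 : min (r * C + (k + 1)) n = n := by omega
      have hcond : ¬ ((min (r * C + k) n : Nat) : Int) < PySem.Chars.len cs := by
        rw [PySem.Chars.len_eq, hmin]; omega
      simp only [List.foldl_cons, List.foldl_nil]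
      rw [if_neg hcond, hmin, hmin2]

lemma fill_all (cs : List Char) (R C : Nat) :
    ∀ i, i ≤ R →
    (List.range i).foldl (fun st (r : Nat) =>
        (List.range C).foldl (fun st (c : Nat) =>
          if st.2 < PySem.Chars.len cs then
            (PySem.List.pySetD st.1 (r : Int)
               (PySem.List.pySetD (PySem.List.pyGetD st.1 (r : Int) []) (c : Int)
                 [PySem.List.pyGetD cs st.2 ' ']),
             st.2 + 1)
          else st) st)
      (gridAt cs R C 0, 0)
    = (gridAt cs R C (min (i * C) cs.length), ((min (i * C) cs.length : Nat) : Int)) := by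
  intro i
  induction i with
  | zero => intro _; simp
  | succ i ih =>
    intro hi
    rw [List.range_succ, List.foldl_append, ih (by omega)]
    simp only [List.foldl_cons, List.foldl_nil]
    rw [fill_inner cs R C i (by omega) C (le_refl C)]
    have : i * C + C = (i + 1) * C := by ring
    rw [this]

lemma flatten_map_singleton {α β : Type} (f : α → β) (l : List α) :
    (l.map (fun x => [f x])).flatten = l.map f := by
  induction l with
  | nil => rfl
  | cons x t ih => simp [ih]

lemma flatten_if_singleton {α : Type} (f : Nat → α) (cnt R : Nat) (h : cnt ≤ R) :
    ((List.range R).map (fun r => if r < cnt then [f r] else [])).flatten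
      = (List.range cnt).map f := by
  obtain ⟨d, rfl⟩ := Nat.exists_eq_add_of_le h
  rw [List.range_add, List.map_append, List.flatten_append, List.map_map]
  have h1 : (List.range cnt).map (fun r => if r < cnt then [f r] else [])
      = (List.range cnt).map (fun r => [f r]) := by
    apply List.map_congr_left
    intro x hx
    simp [List.mem_range.mp hx]
  have h2 : ((List.range d).map ((fun r => if r < cnt then [f r] else []) ∘ (fun x => cnt + x)))
      = (List.range d).map (fun _ => ([] : List α)) := by
    apply List.map_congr_left
    intro x hx
    simp
  rw [h1, h2, flatten_map_singleton]
  simp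

lemma flatten_filter_ne_nil {α β : Type} (g : α → List β) (l : List α) :
    ((l.filter (fun x => decide (g x ≠ []))).map g).flatten = (l.map g).flatten := by
  induction l with
  | nil => rfl
  | cons x t ih =>
    simp only [ne_eq, decide_not] at ih ⊢
    by_cases hx : g x = []
    · simp [hx, ih]
    · simp [hx, ih]

lemma flatten_reverse_short {α : Type} (L : List (List α)) (h : ∀ x ∈ L, x.length ≤ 1) :
    L.reverse.flatten = L.flatten.reverse := by
  have hmap : List.map List.reverse L = L := by
    conv_rhs => rw [← List.map_id L]
    apply List.map_congr_left
    intro x hx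
    have := h x hx
    match x with
    | [] => rfl
    | [a] => rfl
    | a :: b :: t => simp at this
  rw [List.reverse_flatten, hmap]

lemma colCnt_le {C : Nat} (hC : 0 < C) {n c R : Nat} (hn : n ≤ R * C) :
    colCnt n c C ≤ R := by
  by_contra h
  have := (lt_colCnt_iff hC n c R).mp (by omega)
  omega

lemma colA_eq (cs : List Char) (R C c : Nat) (hC : 0 < C) (hc : c < C)
    (hn : cs.length ≤ R * C) :
    ((List.range R).map (fun r => cellAt cs C r c cs.length)).flatten
      = colClosed cs C c := by
  have h1 : (List.range R).map (fun r => cellAt cs C r c cs.length)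
      = (List.range R).map (fun r => if r < colCnt cs.length c C
          then [cs.getD (r * C + c) ' '] else []) := by
    apply List.map_congr_left
    intro r _
    unfold cellAt
    rw [if_congr (lt_colCnt_iff hC cs.length c r).symm rfl rfl]
  rw [h1, flatten_if_singleton _ _ _ (colCnt_le hC hn)]
  rfl

lemma filterMap_eq_map_of {α β : Type} (g : α → Option β) (f : α → β) (l : List α)
    (h : ∀ x ∈ l, g x = some (f x)) : l.filterMap g = l.map f := by
  induction l with
  | nil => rfl
  | cons x t ih =>
    rw [List.filterMap_cons, h x (List.mem_cons_self), List.map_cons,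
        ih (fun y hy => h y (List.mem_cons_of_mem x hy))]

lemma slice_col (cs : List Char) (C c : Nat) (hC : 0 < C) :
    PySem.List.slice? cs (some (c : Int)) none (C : Int) = some (colClosed cs C c) := by
  set n := cs.length with hn
  rw [PySem.List.slice?, if_neg (by omega : ¬ (C : Int) = 0), PySem.List.sliceIndices]
  simp only [if_neg (by omega : ¬ (C : Int) < 0), if_neg (by omega : ¬ (c : Int) < 0)]
  rw [if_pos (by omega : (0 : Int) < (C : Int))]
  rcases (by omega : n ≤ c ∨ c < n) with hcn | hcn
  · have hmin : min (c : Int) (n : Int) = (n : Int) := by omega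
    rw [hmin, if_neg (by omega : ¬ (n : Int) < (n : Int))]
    have hcnt : colCnt n c C = 0 := by
      rw [colCnt]; apply Nat.div_eq_of_lt; omega
    simp [colClosed, ← hn, hcnt]
  · have hmin : min (c : Int) (n : Int) = (c : Int) := by omega
    rw [hmin, if_pos (by omega : (c : Int) < (n : Int))]
    have hcast : (n : Int) - (c : Int) + (C : Int) - 1 = ((n - c + C - 1 : Nat) : Int) := by
      omega
    have hcnt : (((n : Int) - (c : Int) + (C : Int) - 1) / (C : Int)).toNat = colCnt n c C := by
      rw [hcast, ← Int.natCast_div, Int.toNat_natCast, colCnt]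
    rw [hcnt]
    congr 1
    apply filterMap_eq_map_of
    intro k hk
    have hk' : k * C + c < n := (lt_colCnt_iff hC n c k).mp (List.mem_range.mp hk)
    have hidx : ((c : Int) + (C : Int) * (k : Int)).toNat = k * C + c := by
      have : (c : Int) + (C : Int) * (k : Int) = ((k * C + c : Nat) : Int) := by push_cast; ring
      rw [this, Int.toNat_natCast]
    rw [hidx, List.getElem?_eq_getElem hk', List.getD_eq_getElem cs ' ' hk']

lemma foldl_flatten_parts {α β : Type} (f : List (List α) → β → List (List α))
    (k : β → List α) (l : List β)
    (h : ∀ c ∈ l, ∀ res, (f res c).flatten = res.flatten ++ k c) :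
    ∀ res, (l.foldl f res).flatten = res.flatten ++ (l.map k).flatten := by
  induction l with
  | nil => intro res; simp
  | cons x t ih =>
    intro res
    rw [List.foldl_cons, ih (fun c hc => h c (List.mem_cons_of_mem x hc)),
        h x List.mem_cons_self res]
    simp

lemma grid0_eq (cs : List Char) (R C : Nat) :
    ((List.range R).map (fun k : Nat => (k : Int))).map
        (fun _ => ((List.range C).map (fun k : Nat => (k : Int))).map (fun _ => ([] : List Char)))
      = gridAt cs R C 0 := by
  simp only [gridAt, cellAt, List.map_map]
  apply List.map_congr_left
  intro r _
  apply List.map_congr_left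
  intro c _
  simp

lemma cell_short (cs : List Char) (C r c m : Nat) : (cellAt cs C r c m).length ≤ 1 := by
  unfold cellAt
  split <;> simp

lemma mod2_cast (c : Nat) : PySem.Int.mod (c : Int) 2 = ((c % 2 : Nat) : Int) := by
  exact_mod_cast PySem.Int.mod_natCast c 2

lemma readA_col (cs : List Char) (R C c' : Nat) (hC : 0 < C) (hc' : c' < C)
    (hn : cs.length ≤ R * C) (res : List (List Char)) :
    ((if PySem.Int.mod (c' : Int) 2 = 0
        then (List.range R).map (fun k : Nat => (k : Int))
        else ((List.range R).map (fun k : Nat => (k : Int))).reverse).foldl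
      (fun res r =>
        if PySem.List.pyGetD (PySem.List.pyGetD (gridAt cs R C cs.length) r []) (c' : Int) [] ≠ []
        then res ++ [PySem.List.pyGetD (PySem.List.pyGetD (gridAt cs R C cs.length) r []) (c' : Int) []]
        else res) res).flatten
    = res.flatten ++ colZig cs C c' := by
  set cellf : Int → List Char :=
    fun r => PySem.List.pyGetD (PySem.List.pyGetD (gridAt cs R C cs.length) r []) (c' : Int) []
    with hcellf
  have hmap : ((List.range R).map (fun k : Nat => (k : Int))).map cellf
      = (List.range R).map (fun r => cellAt cs C r c' cs.length) := by
    rw [List.map_map]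
    apply List.map_congr_left
    intro r hr
    have hrR := List.mem_range.mp hr
    show cellf ((r : Nat) : Int) = _
    rw [hcellf]
    unfold gridAt
    beta_reduce
    rw [pyGetD_map_range _ R r hrR, pyGetD_map_range _ C c' hc']
  rw [mod2_cast]
  rcases (by omega : c' % 2 = 0 ∨ c' % 2 = 1) with h2 | h2
  · rw [if_pos (by rw [h2]; rfl)]
    rw [PySem.List.foldl_append_ite (p := fun r => cellf r ≠ []) (f := cellf),
        List.flatten_append, flatten_filter_ne_nil, hmap,
        colA_eq cs R C c' hC hc' hn]
    rw [colZig, if_pos h2]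
  · rw [if_neg (by rw [h2]; omega)]
    rw [PySem.List.foldl_append_ite (p := fun r => cellf r ≠ []) (f := cellf),
        List.flatten_append, flatten_filter_ne_nil, List.map_reverse, hmap,
        flatten_reverse_short _ (by
          intro x hx
          obtain ⟨r, _, rfl⟩ := List.mem_map.mp hx
          exact cell_short cs C r c' cs.length),
        colA_eq cs R C c' hC hc' hn]
    rw [colZig, if_neg (by omega)]

-- ===== VERDICT (by name: the statement is the Claim_ definition above) =====
theorem route_column_zigzag_spec : Claim_equal_route_column_zigzag := by
  intro ct nrows ncols _
  unfold Spec_route_column_zigzag route_column_zigzag route_column_zigzag_alt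
  set cs := ct.toList with hcs
  by_cases hg : nrows * ncols < PySem.Chars.len cs
  · rw [if_pos hg, if_pos hg]
  rw [if_neg hg, if_neg hg]
  by_cases hc0 : ncols ≤ 0
  · rw [PySem.List.pyRange_one_eq_nil hc0]
    simp
  push_neg at hc0
  have hr0 : 0 ≤ nrows := by
    by_contra hr
    push_neg at hr
    have h1 := mul_neg_of_neg_of_pos hr hc0
    rw [PySem.Chars.len_eq] at hg
    omega
  obtain ⟨C, rfl⟩ : ∃ C : Nat, ncols = (C : Int) := ⟨ncols.toNat, by omega⟩
  obtain ⟨R, rfl⟩ : ∃ R : Nat, nrows = (R : Int) := ⟨nrows.toNat, by omega⟩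
  have hCpos : 0 < C := by exact_mod_cast hc0
  have hn : cs.length ≤ R * C := by
    rw [PySem.Chars.len_eq] at hg
    push_neg at hg
    exact_mod_cast (by push_cast; exact hg : ((cs.length : Int)) ≤ ((R * C : Nat) : Int))
  simp only [pyRange_toNat, Int.toNat_natCast, List.foldl_map,
    PySem.List.pyRange_neg_one_eq_reverse, neg_add_cancel, sub_add_cancel]
  rw [grid0_eq cs R C]
  rw [fill_all cs R C R le_rfl]
  have hminn : min (R * C) cs.length = cs.length := by omega
  rw [hminn]
  apply congrArg
  rw [foldl_flatten_parts _ (fun c : Nat => colZig cs C c) (List.range C)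
        (fun c' hc' res => readA_col cs R C c' hCpos (List.mem_range.mp hc') hn res) [],
      foldl_flatten_parts _ (fun c : Nat => colZig cs C c) (List.range C)
        (fun c' hc' res => ?_) []]
  -- B-side per-column part
  rw [List.flatten_append, slice_col cs C c' hCpos, Option.getD_some, mod2_cast]
  rcases (by omega : c' % 2 = 0 ∨ c' % 2 = 1) with h2 | h2
  · rw [if_neg (by rw [h2]; omega)]
    simp only [colZig]
    rw [if_pos h2]
    simp
  · rw [if_pos (by rw [h2]; rfl)]
    simp only [colZig]
    rw [if_neg (by omega)]
    simp
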